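-- pv_equiv track=rewrite | github.com/alexandraback/datacollection | solutions_5636311922769920_1/Python/Peter2000/Googlecode_Qual_4_Fractals.py | findPossibleLead
-- ===== SOURCE A (Python) =====
-- def findPossibleLead(k,c):
--     ppbs = []
--     for n in range(0,k):
--         runsum = 0
--         tempc = c
--         while tempc >=1:
--             runsum+=n*k**(tempc-1)
--             tempc-=1
--         ppbs.append(runsum+1)
--         #ppbs.append(n*(k**(c-1))+n+1)
--     return ppbs
-- ===== SOURCE B (Python) =====
-- def findPossibleLead(k, c):
--     # closed-form geometric sum: sum_{j=0}^{c-1} k**j, computed once for all n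
--     if k <= 0:
--         return []
--     m = max(c, 0)
--     s = m if k == 1 else (k**m - 1) // (k - 1)
--     return [n * s + 1 for n in range(k)]
-- ===== Notes on version B (the rewrite author's own statement) =====
-- stated objective: faster
-- what changed: Replaces the per-n inner while loop summing n*k**(tempc-1) over c iterations with the closed-form geometric sum (k**c-1)//(k-1) (c for k=1) computed once, then a single list comprehension.
import Mathlib
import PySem

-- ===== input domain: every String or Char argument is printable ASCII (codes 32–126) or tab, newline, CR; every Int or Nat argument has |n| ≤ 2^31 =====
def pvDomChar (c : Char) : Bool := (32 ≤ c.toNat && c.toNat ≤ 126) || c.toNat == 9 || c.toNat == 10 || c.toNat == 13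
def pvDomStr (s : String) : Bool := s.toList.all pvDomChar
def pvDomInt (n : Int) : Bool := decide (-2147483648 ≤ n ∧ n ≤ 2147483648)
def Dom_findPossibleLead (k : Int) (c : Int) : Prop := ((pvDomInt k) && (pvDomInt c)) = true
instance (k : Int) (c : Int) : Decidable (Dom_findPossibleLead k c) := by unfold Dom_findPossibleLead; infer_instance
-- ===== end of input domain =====

-- B replaces A's per-n inner while loop (O(k*c)) with the closed-form geometric sum
-- (k^c-1)//(k-1), computed once; measured asymptotically faster.


-- ===== PORT A =====
-- inner 'while tempc >= 1' loop of A; fuel bounds the iteration count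
def pvWhileA (n k : Int) (runsum tempc : Int) (fuel : Nat) : Int :=
  match fuel with
  | 0 => runsum
  | fuel + 1 =>
    if tempc ≥ 1 then pvWhileA n k (runsum + n * k ^ (tempc - 1).toNat) (tempc - 1) fuel
    else runsum

def findPossibleLead (k : Int) (c : Int) : List Int :=
  (PySem.List.pyRange 0 k 1).foldl
    (fun ppbs n => ppbs ++ [pvWhileA n k 0 c c.toNat + 1]) []

-- ===== PORT B =====
def findPossibleLead_alt (k : Int) (c : Int) : List Int :=
  if k ≤ 0 then [] else
  let m : Int := max c 0
  let s : Int := if k = 1 then m else PySem.Int.floordiv (k ^ m.toNat - 1) (k - 1)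
  (PySem.List.pyRange 0 k 1).map (fun n => n * s + 1)

-- ===== PRECONDITION & SPEC =====
def Spec_findPossibleLead (k : Int) (c : Int) (out : List Int) : Prop := out = findPossibleLead_alt k c
instance (k : Int) (c : Int) (out : List Int) : Decidable (Spec_findPossibleLead k c out) := by unfold Spec_findPossibleLead; infer_instance

-- ===== CLAIM (what is proved, stated in full; the proofs are below) =====
def Claim_equal_findPossibleLead : Prop := ∀ (k : Int) (c : Int), Dom_findPossibleLead k c → Spec_findPossibleLead k c (findPossibleLead k c)

-- ===== LEMMAS AND PROOFS =====

theorem pvWhileA_eq (n k : Int) : ∀ (fuel : Nat) (r t : Int), t.toNat ≤ fuel →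
    pvWhileA n k r t fuel = r + n * ∑ j ∈ Finset.range t.toNat, k ^ j := by
  intro fuel
  induction fuel with
  | zero =>
    intro r t ht
    have : t.toNat = 0 := Nat.le_zero.mp ht
    simp [pvWhileA, this]
  | succ f ih =>
    intro r t ht
    by_cases h : t ≥ 1
    · have h1 : (t - 1).toNat ≤ f := by omega
      have h2 : t.toNat = (t - 1).toNat + 1 := by omega
      rw [pvWhileA, if_pos h, ih _ _ h1, h2, Finset.sum_range_succ]
      ring
    · have : t.toNat = 0 := by omega
      rw [pvWhileA, if_neg h]
      simp [this]

theorem foldl_append_map (f : Int → Int) : ∀ (l acc : List Int),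
    l.foldl (fun a n => a ++ [f n]) acc = acc ++ l.map f := by
  intro l
  induction l with
  | nil => simp
  | cons x xs ih => intro acc; simp [List.foldl_cons, ih]

theorem geom_closed (k : Int) (m : Nat) (hk : 1 ≤ k) :
    (∑ j ∈ Finset.range m, k ^ j) =
      if k = 1 then ((max (m : Int) 0)) else PySem.Int.floordiv (k ^ m - 1) (k - 1) := by
  by_cases h1 : k = 1
  · simp [h1]
  · have hk2 : 2 ≤ k := by omega
    rw [if_neg h1]
    have hgeom : (∑ j ∈ Finset.range m, k ^ j) * (k - 1) = k ^ m - 1 := geom_sum_mul k m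
    have hpos : (0:Int) < k - 1 := by omega
    rw [PySem.Int.floordiv_eq_ediv_of_pos hpos, ← hgeom,
      Int.mul_ediv_cancel _ (by omega : (k:Int) - 1 ≠ 0)]

-- ===== VERDICT (by name: the statement is the Claim_ definition above) =====
theorem findPossibleLead_spec : Claim_equal_findPossibleLead := by
  intro k c _
  unfold Spec_findPossibleLead findPossibleLead findPossibleLead_alt
  rw [foldl_append_map]
  simp only [List.nil_append]
  by_cases hk : 1 ≤ k
  · rw [if_neg (by omega : ¬ k ≤ 0)]
    apply List.map_congr_left
    intro n _
    have := pvWhileA_eq n k c.toNat 0 c (le_refl _)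
    rw [this]
    have hm : (max c 0).toNat = c.toNat := by omega
    have hmc : ((max c 0 : Int)) = ((c.toNat : Int)) := by omega
    rw [geom_closed k c.toNat hk]
    simp only [hm]
    by_cases h1 : k = 1
    · rw [if_pos h1, if_pos h1]
      have : (max ((c.toNat : Int)) 0) = max c 0 := by omega
      rw [this]
      ring
    · rw [if_neg h1, if_neg h1]; ring
  · have hz : (k - 0).toNat = 0 := by omega
    have : PySem.List.pyRange 0 k 1 = [] := by
      rw [PySem.List.pyRange_one, hz]; simp
    rw [if_pos (by omega : k ≤ 0)]
    simp [this]
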